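-- pv_equiv track=rewrite | github.com/jiiyeon/Algorithm_Prac | BOJ/stage08/06.py | cnt_people
-- ===== SOURCE A (Python) =====
-- def     sub_sum(list, idx) :
--
--     i = 0
--     sum = 0
--     while (i <= idx) :
--         sum += list[i]
--         i += 1
--
--     return(sum)
--
-- def     cnt_people(floor, col) :
--
--     total_lst = []
--     element_lst = list(range(1, col + 1))
--
--     i = 0
--     while (i <= floor) :
--
--         total_lst.append(element_lst)
--
--         r = 0
--         ch_lst = []
--         while (r < len(element_lst)) :
--             ch_lst.append(sub_sum(element_lst, r))
--             r += 1
--         i +=1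
--         element_lst = ch_lst
--
--     return(total_lst[floor][col - 1])
-- ===== SOURCE B (Python) =====
-- def cnt_people(floor, col):
--     # One pass per floor with a running accumulator: O(floor*col) instead of
--     # A's sub_sum rescans (O(floor*col^2)).
--     row = list(range(1, col + 1))
--     for _ in range(floor):
--         new = []
--         s = 0
--         for x in row:
--             s += x
--             new.append(s)
--         row = new
--     return row[col - 1]
-- ===== Notes on version B (the rewrite author's own statement) =====
-- stated objective: faster
-- what changed: Each new row is built with a single running-sum accumulator over the previous row, eliminating A's sub_sum helper that rescans the prefix for every position (and A's list of all rows).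
import Mathlib
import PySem

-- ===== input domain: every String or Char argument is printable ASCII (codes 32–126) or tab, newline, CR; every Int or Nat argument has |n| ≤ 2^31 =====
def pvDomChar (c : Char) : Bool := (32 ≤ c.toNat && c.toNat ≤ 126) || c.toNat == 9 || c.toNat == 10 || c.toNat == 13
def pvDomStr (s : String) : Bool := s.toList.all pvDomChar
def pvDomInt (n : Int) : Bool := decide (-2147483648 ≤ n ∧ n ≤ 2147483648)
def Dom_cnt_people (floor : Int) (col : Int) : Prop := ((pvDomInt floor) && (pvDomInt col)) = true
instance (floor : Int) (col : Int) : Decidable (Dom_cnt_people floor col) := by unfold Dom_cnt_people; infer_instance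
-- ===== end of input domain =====

-- B builds each new row with a single running-sum accumulator instead of A's per-position prefix rescans (sub_sum), and keeps only the current row instead of A's list of all rows.

-- ===== PORT A =====
-- sub_sum's while loop; list[i] → (pyGet? …).getD 0 (the none/IndexError case is unreachable: i stays in range on the lists A passes)
def pvSubSumGo (l : List Int) (idx : Int) (i : Int) (sum : Int) : Int :=
  if i ≤ idx then pvSubSumGo l idx (i + 1) (sum + (PySem.List.pyGet? l i).getD 0) else sum
termination_by (idx + 1 - i).toNat
decreasing_by omega

def pvSubSum (l : List Int) (idx : Int) : Int := pvSubSumGo l idx 0 0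

-- inner while loop building ch_lst
def pvChGo (el : List Int) (r : Int) (ch : List Int) : List Int :=
  if r < PySem.List.len el then pvChGo el (r + 1) (ch ++ [pvSubSum el r]) else ch
termination_by (PySem.List.len el - r).toNat
decreasing_by simp only [PySem.List.len_eq] at *; omega

-- outer while loop appending rows to total_lst
def pvOuterGo (floor : Int) (i : Int) (total : List (List Int)) (el : List Int) : List (List Int) :=
  if i ≤ floor then pvOuterGo floor (i + 1) (total ++ [el]) (pvChGo el 0 []) else total
termination_by (floor + 1 - i).toNat
decreasing_by omega

def cnt_people (floor : Int) (col : Int) : Int :=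
  let el := PySem.List.pyRange 1 (col + 1) 1
  let total := pvOuterGo floor 0 [] el
  -- total_lst[floor][col - 1]; the getD defaults are unreachable inside Pre_ (IndexError otherwise)
  let row := (PySem.List.pyGet? total floor).getD []
  (PySem.List.pyGet? row (col - 1)).getD 0

-- ===== PORT B =====
-- the running-sum inner loop of Source B
def altScan (row : List Int) (s : Int) (new : List Int) : List Int :=
  match row with
  | [] => new
  | x :: xs => altScan xs (s + x) (new ++ [s + x])

def cnt_people_alt (floor : Int) (col : Int) : Int :=
  let row0 := PySem.List.pyRange 1 (col + 1) 1
  let row := (PySem.List.pyRange 0 floor 1).foldl (fun r _ => altScan r 0 []) row0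
  -- row[col - 1]; getD unreachable inside Pre_ (IndexError otherwise)
  (PySem.List.pyGet? row (col - 1)).getD 0

-- ===== PRECONDITION & SPEC =====
-- Pre_: exactly where Python A returns normally (floor < 0 leaves total_lst empty, col < 1 leaves the row empty; either way total_lst[floor][col-1] is an IndexError)
def Pre_cnt_people (floor : Int) (col : Int) : Prop := 0 ≤ floor ∧ 1 ≤ col
instance (floor : Int) (col : Int) : Decidable (Pre_cnt_people floor col) := by unfold Pre_cnt_people; infer_instance
def pvWitness_cnt_people : Int × Int := (2, 3)

def Spec_cnt_people (floor : Int) (col : Int) (out : Int) : Prop := out = cnt_people_alt floor col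
instance (floor : Int) (col : Int) (out : Int) : Decidable (Spec_cnt_people floor col out) := by unfold Spec_cnt_people; infer_instance

-- ===== CLAIM (what is proved, stated in full; the proofs are below) =====
def Claim_equal_cnt_people : Prop := ∀ (floor : Int) (col : Int), Dom_cnt_people floor col → Pre_cnt_people floor col → Spec_cnt_people floor col (cnt_people floor col)

-- ===== LEMMAS AND PROOFS =====

-- the row transform both programs iterate: prefix sums
def psum (el : List Int) : List Int :=
  (List.range el.length).map (fun j => (el.take (j + 1)).sum)

lemma subSumGo_eq (n : Nat) : ∀ (l : List Int) (idx i s : Int), 0 ≤ i → n = (idx + 1 - i).toNat →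
    pvSubSumGo l idx i s = s + ((l.take (idx + 1).toNat).drop i.toNat).sum := by
  induction n with
  | zero =>
      intro l idx i s hi hn
      rw [pvSubSumGo]
      rw [if_neg (by omega)]
      rw [List.drop_eq_nil_of_le (by have := List.length_take_le (idx+1).toNat l; omega)]
      simp
  | succ m ih =>
      intro l idx i s hi hn
      rw [pvSubSumGo]
      rw [if_pos (by omega)]
      rw [ih l idx (i+1) _ (by omega) (by omega)]
      by_cases hlen : i.toNat < l.length
      · have hget : PySem.List.pyGet? l i = some l[i.toNat] :=
          PySem.List.pyGet?_eq_some_getElem l hi (by exact_mod_cast by omega)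
        have htk : i.toNat < ((l.take (idx+1).toNat).length) := by
          rw [List.length_take]; omega
        rw [List.drop_eq_getElem_cons htk]
        have : (l.take (idx+1).toNat)[i.toNat] = l[i.toNat] := List.getElem_take
        rw [this, hget]
        simp [List.sum_cons]
        have : (i + 1).toNat = i.toNat + 1 := by omega
        rw [this]
        ring
      · have hget : PySem.List.pyGet? l i = none := by
          rw [PySem.List.pyGet?_of_nonneg l hi]
          exact List.getElem?_eq_none (by omega)
        have h1 : (l.take (idx+1).toNat).drop i.toNat = [] :=
          List.drop_eq_nil_of_le (by rw [List.length_take]; omega)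
        have h2 : (l.take (idx+1).toNat).drop (i+1).toNat = [] :=
          List.drop_eq_nil_of_le (by rw [List.length_take]; omega)
        rw [h1, h2, hget]
        simp

lemma subSum_eq (l : List Int) (j : Nat) : pvSubSum l (j : Int) = (l.take (j + 1)).sum := by
  rw [pvSubSum, subSumGo_eq ((j : Int) + 1 - 0).toNat l j 0 0 (by omega) rfl]
  have : ((j : Int) + 1).toNat = j + 1 := by omega
  simp [this]

lemma chGo_eq (n : Nat) : ∀ (el : List Int) (r : Int) (ch : List Int), 0 ≤ r → n = el.length - r.toNat →
    pvChGo el r ch = ch ++ (List.range' r.toNat n).map (fun j => (el.take (j + 1)).sum) := by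
  induction n with
  | zero =>
      intro el r ch hr hn
      rw [pvChGo, if_neg (by simp only [PySem.List.len_eq]; omega)]
      simp
  | succ m ih =>
      intro el r ch hr hn
      rw [pvChGo, if_pos (by simp only [PySem.List.len_eq]; omega)]
      rw [ih el (r+1) _ (by omega) (by omega)]
      have hsub : pvSubSum el r = (el.take (r.toNat + 1)).sum := by
        have h := subSum_eq el r.toNat
        rwa [show ((r.toNat : Nat) : Int) = r by omega] at h
      have hsucc : (r + 1).toNat = r.toNat + 1 := by omega
      rw [hsub, hsucc, List.range'_succ]
      simp

lemma chGo_psum (el : List Int) : pvChGo el 0 [] = psum el := by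
  rw [chGo_eq el.length el 0 [] (by omega) (by simp), psum]
  simp [List.range_eq_range']

lemma altScan_eq : ∀ (xs : List Int) (s : Int) (acc : List Int),
    altScan xs s acc = acc ++ (List.range xs.length).map (fun j => s + (xs.take (j + 1)).sum) := by
  intro xs
  induction xs with
  | nil => intro s acc; simp [altScan]
  | cons x xs ih =>
      intro s acc
      rw [altScan, ih]
      simp [List.range_succ_eq_map, List.map_map, Function.comp_def, add_assoc]

lemma altScan_psum (el : List Int) : altScan el 0 [] = psum el := by
  simp [altScan_eq, psum]

lemma outerGo_eq (n : Nat) : ∀ (floor i : Int) (total : List (List Int)) (el : List Int),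
    n = (floor + 1 - i).toNat →
    pvOuterGo floor i total el = total ++ (List.range n).map (fun k => psum^[k] el) := by
  induction n with
  | zero =>
      intro floor i total el hn
      rw [pvOuterGo, if_neg (by omega)]
      simp
  | succ m ih =>
      intro floor i total el hn
      rw [pvOuterGo, if_pos (by omega)]
      rw [ih floor (i+1) _ _ (by omega), chGo_psum]
      simp only [List.range_succ_eq_map, List.map_cons, List.map_map, Function.comp_def,
        Function.iterate_succ_apply, Function.iterate_zero_apply]
      simp

lemma foldl_const_iter {α β : Type} (g : α → α) : ∀ (L : List β) (x : α),
    L.foldl (fun r _ => g r) x = g^[L.length] x := by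
  intro L
  induction L with
  | nil => intro x; rfl
  | cons y ys ih =>
      intro x
      simp only [List.foldl_cons, List.length_cons, ih, Function.iterate_succ_apply]

-- ===== VERDICT (by name: the statement is the Claim_ definition above) =====
theorem cnt_people_spec : Claim_equal_cnt_people := by
  intro floor col _ hpre
  obtain ⟨hf, _⟩ := hpre
  unfold Spec_cnt_people cnt_people cnt_people_alt
  dsimp only
  have hA : pvOuterGo floor 0 [] (PySem.List.pyRange 1 (col + 1) 1)
      = (List.range (floor.toNat + 1)).map (fun k => psum^[k] (PySem.List.pyRange 1 (col + 1) 1)) := by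
    rw [outerGo_eq (floor.toNat + 1) floor 0 _ _ (by omega)]
    simp
  have hB : (PySem.List.pyRange 0 floor 1).foldl (fun r _ => altScan r 0 [])
      (PySem.List.pyRange 1 (col + 1) 1) = psum^[floor.toNat] (PySem.List.pyRange 1 (col + 1) 1) := by
    simp only [altScan_psum]
    rw [foldl_const_iter, PySem.List.length_pyRange_one]
    congr 1
    omega
  rw [hA, hB]
  rw [PySem.List.pyGet?_of_nonneg _ hf]
  have hlt : floor.toNat < ((List.range (floor.toNat + 1)).map
      (fun k => psum^[k] (PySem.List.pyRange 1 (col + 1) 1))).length := by simp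
  rw [List.getElem?_eq_getElem hlt]
  simp only [Option.getD_some, List.getElem_map, List.getElem_range]
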